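-- pv_equiv track=rewrite | github.com/pypi-data/pypi-mirror-122 | packages/microt-compliance/microt_compliance-0.0.46.tar.gz/microt_compliance-0.0.46/microt_compliance_matrix/feature_engineering/prompt_response/preprocess_promptResponse_raw.py | splitMultiLogsinOneRow
-- ===== SOURCE A (Python) =====
-- def splitMultiLogsinOneRow(row, participant_id):
--     rows = []
--     id_index = [i for i, s in enumerate(row) if participant_id in s]
--     if len(id_index) > 1:
--
--         error_index = id_index[1]
--         split1 = row[error_index].replace(participant_id, "")
--         split2 = participant_id
--
--         row1 = row[:error_index] + [split1]
--         row2 = [split2] + row[error_index + 1:]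
--         rows.append(row1)
--         rows.append(row2)
--         if len(id_index) > 2:
--             rows = rows[:-1] + splitMultiLogsinOneRow(rows[-1], participant_id)
--     else:
--         rows.append(row)
--
--     return rows
-- ===== SOURCE B (Python) =====
-- def splitMultiLogsinOneRow(row, participant_id):
--     # single left-to-right pass: after the first cell containing participant_id,
--     # each further such cell closes the current row (with the id stripped from
--     # that cell) and starts a new row beginning with participant_id
--     out = []
--     cur = []
--     seen = False
--     for cell in row:
--         if participant_id in cell:
--             if seen:
--                 cur.append(cell.replace(participant_id, ""))
--                 out.append(cur)
--                 cur = [participant_id]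
--                 continue
--             seen = True
--         cur.append(cell)
--     out.append(cur)
--     return out
-- ===== Notes on version B (the rewrite author's own statement) =====
-- stated objective: alternative
-- what changed: B replaces A's recursive re-scan (recompute all id-occurrence indices, slice the row, and recurse on the tail row) with a single left-to-right pass that closes the current row and starts a new one at each occurrence of participant_id after the first.
import Mathlib
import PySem

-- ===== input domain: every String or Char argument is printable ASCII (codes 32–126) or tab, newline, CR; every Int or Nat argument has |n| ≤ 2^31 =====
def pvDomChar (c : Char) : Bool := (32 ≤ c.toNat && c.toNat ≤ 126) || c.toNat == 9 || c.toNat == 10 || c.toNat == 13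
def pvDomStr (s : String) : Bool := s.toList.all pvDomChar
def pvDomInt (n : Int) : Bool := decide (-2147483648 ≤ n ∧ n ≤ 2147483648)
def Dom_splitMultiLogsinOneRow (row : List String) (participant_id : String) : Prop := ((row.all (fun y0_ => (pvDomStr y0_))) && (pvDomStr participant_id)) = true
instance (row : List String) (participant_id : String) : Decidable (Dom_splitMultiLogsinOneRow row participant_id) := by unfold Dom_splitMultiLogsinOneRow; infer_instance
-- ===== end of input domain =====

-- B replaces A's recursive re-scan-and-slice with a single left-to-right pass; equivalence is proved for all inputs.

-- ===== PORT A =====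
-- helper: the comprehension [i for i, s in enumerate(row) if participant_id in s]
def idList (row : List String) (participant_id : String) : List Int :=
  ((PySem.List.enumerate row).filter (fun p => PySem.Str.isIn participant_id p.2)).map (fun p => p.1)

-- facts about idList needed by the port's termination argument (cited in decreasing_by)
lemma idList_mem_bounds (row : List String) (pid : String) :
    ∀ j ∈ idList row pid, 0 ≤ j ∧ j < (row.length : Int) := by
  intro j hj
  simp only [idList, List.mem_map] at hj
  obtain ⟨p, hp, rfl⟩ := hj
  have hmem := (List.mem_filter.1 hp).1
  rw [PySem.List.mem_enumerate_iff] at hmem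
  obtain ⟨k, hk, rfl⟩ := hmem
  constructor <;> simp <;> omega

lemma idList_pairwise (row : List String) (pid : String) :
    (idList row pid).Pairwise (· < ·) := by
  exact List.pairwise_map.2 ((PySem.List.pairwise_lt_enumerate row 0).filter _)

lemma e_bounds (row : List String) (pid : String) (h : 1 < (idList row pid).length) :
    1 ≤ PySem.List.pyGetD (idList row pid) 1 0 ∧
      PySem.List.pyGetD (idList row pid) 1 0 < (row.length : Int) := by
  have h0 : 0 < (idList row pid).length := by omega
  have hget : PySem.List.pyGetD (idList row pid) 1 0 = (idList row pid)[1] :=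
    PySem.List.pyGetD_ofNat _ 1 0 h
  have hlt : (idList row pid)[0] < (idList row pid)[1] :=
    (List.pairwise_iff_getElem.1 (idList_pairwise row pid)) 0 1 h0 h (by omega)
  have hb0 := idList_mem_bounds row pid _ (List.getElem_mem h0)
  have hb1 := idList_mem_bounds row pid _ (List.getElem_mem h)
  rw [hget]; omega

lemma row2_len_lt (row : List String) (pid : String) (h : 1 < (idList row pid).length) :
    (pid :: PySem.List.slice row (some (PySem.List.pyGetD (idList row pid) 1 0 + 1)) none).length
      < row.length := by
  obtain ⟨h1, h2⟩ := e_bounds row pid h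
  rw [PySem.List.slice_from _ (by omega)]
  simp only [List.length_cons, List.length_drop]
  omega

def splitMultiLogsinOneRow (row : List String) (participant_id : String) : List (List String) :=
  let rows : List (List String) := []
  let id_index := idList row participant_id
  if h : 1 < id_index.length then
    let error_index := PySem.List.pyGetD id_index 1 0
    let split1 := PySem.Str.replace (PySem.List.pyGetD row error_index "") participant_id ""
    let split2 := participant_id
    let row1 := PySem.List.slice row none (some error_index) ++ [split1]
    let row2 := split2 :: PySem.List.slice row (some (error_index + 1)) none
    let rows := rows ++ [row1]
    let rows := rows ++ [row2]
    if 2 < id_index.length then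
      PySem.List.slice rows none (some (-1)) ++
        splitMultiLogsinOneRow (PySem.List.pyGetD rows (-1) []) participant_id
    else rows
  else rows ++ [row]
termination_by row.length
decreasing_by
  simp only [PySem.List.pyGetD_neg_one_append_singleton, List.nil_append]
  exact row2_len_lt row participant_id h

-- ===== PORT B =====
-- one loop step: state is (finished rows, current row, seen-first-occurrence flag)
def altStep (pid : String) (st : List (List String) × List String × Bool) (c : String) :
    List (List String) × List String × Bool :=
  if PySem.Str.isIn pid c && st.2.2 then
    (st.1 ++ [st.2.1 ++ [PySem.Str.replace c pid ""]], [pid], st.2.2)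
  else
    (st.1, st.2.1 ++ [c], st.2.2 || PySem.Str.isIn pid c)

def splitMultiLogsinOneRow_alt (row : List String) (participant_id : String) : List (List String) :=
  let s := row.foldl (altStep participant_id) ([], [], false)
  s.1 ++ [s.2.1]

-- ===== PRECONDITION & SPEC =====
def Spec_splitMultiLogsinOneRow (row : List String) (participant_id : String) (out : List (List String)) : Prop := out = splitMultiLogsinOneRow_alt row participant_id
instance (row : List String) (participant_id : String) (out : List (List String)) : Decidable (Spec_splitMultiLogsinOneRow row participant_id out) := by unfold Spec_splitMultiLogsinOneRow; infer_instance

-- ===== CLAIM (what is proved, stated in full; the proofs are below) =====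
def Claim_equal_splitMultiLogsinOneRow : Prop := ∀ (row : List String) (participant_id : String), Dom_splitMultiLogsinOneRow row participant_id → Spec_splitMultiLogsinOneRow row participant_id (splitMultiLogsinOneRow row participant_id)

-- ===== LEMMAS AND PROOFS =====

-- generalized-start form of idList, for the decomposition argument
def idListFrom (pid : String) (xs : List String) (s : Int) : List Int :=
  ((PySem.List.enumerate xs s).filter (fun p => PySem.Str.isIn pid p.2)).map (fun p => p.1)

lemma idList_eq (row : List String) (pid : String) : idList row pid = idListFrom pid row 0 := rfl

lemma idListFrom_nil (pid : String) (s : Int) : idListFrom pid [] s = [] := rfl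

lemma idListFrom_cons (pid x : String) (xs : List String) (s : Int) :
    idListFrom pid (x :: xs) s =
      if PySem.Str.isIn pid x then s :: idListFrom pid xs (s+1) else idListFrom pid xs (s+1) := by
  simp only [idListFrom, PySem.List.enumerate_cons, List.filter_cons]
  split <;> simp_all

lemma idListFrom_nil_iff (pid : String) (xs : List String) (s : Int) :
    idListFrom pid xs s = [] ↔ ∀ x ∈ xs, PySem.Str.isIn pid x = false := by
  induction xs generalizing s with
  | nil => simp [idListFrom_nil]
  | cons x xs ih =>
    rw [idListFrom_cons]
    by_cases hx : PySem.Str.isIn pid x <;> simp only [PySem.Str.isIn_eq] at hx <;> simp [hx, ih (s+1)]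

lemma idListFrom_eq_cons (pid : String) (xs : List String) (s j : Int) (l : List Int)
    (h : idListFrom pid xs s = j :: l) :
    ∃ pre c suf, xs = pre ++ c :: suf ∧ (∀ x ∈ pre, PySem.Str.isIn pid x = false) ∧
      PySem.Str.isIn pid c = true ∧ j = s + (pre.length : Int) ∧ l = idListFrom pid suf (j + 1) := by
  induction xs generalizing s j l with
  | nil => simp [idListFrom_nil] at h
  | cons x xs ih =>
    rw [idListFrom_cons] at h
    by_cases hx : PySem.Str.isIn pid x
    · rw [if_pos hx] at h
      injection h with h1 h2
      exact ⟨[], x, xs, by simp, by simp, hx, by simp; omega, by rw [← h2, h1]⟩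
    · rw [if_neg hx] at h
      obtain ⟨pre, c, suf, hxs, hpre, hc, hj, hl⟩ := ih (s+1) j l h
      refine ⟨x :: pre, c, suf, by simp [hxs], ?_, hc, ?_, hl⟩
      · intro y hy
        rcases List.mem_cons.1 hy with rfl | hy
        · exact Bool.not_eq_true _ ▸ (by simpa using hx)
        · exact hpre y hy
      · simp only [List.length_cons]; push_cast; omega

-- B-side loop lemmas
lemma foldl_altStep_out (pid : String) (cells : List String) :
    ∀ (out : List (List String)) (cur : List String) (seen : Bool),
      cells.foldl (altStep pid) (out, cur, seen) =
        (out ++ (cells.foldl (altStep pid) ([], cur, seen)).1,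
          (cells.foldl (altStep pid) ([], cur, seen)).2) := by
  induction cells with
  | nil => intro out cur seen; simp
  | cons c cells ih =>
    intro out cur seen
    simp only [List.foldl_cons, altStep]
    by_cases hc : (PySem.Str.isIn pid c && seen) = true
    · rw [if_pos hc, if_pos hc]
      rw [ih (out ++ [cur ++ [PySem.Str.replace c pid ""]]) [pid] seen,
          ih ([] ++ [cur ++ [PySem.Str.replace c pid ""]]) [pid] seen]
      simp
    · rw [if_neg hc, if_neg hc]
      exact ih out _ _

lemma foldl_altStep_none (pid : String) (cells : List String)
    (h : ∀ x ∈ cells, PySem.Str.isIn pid x = false) :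
    ∀ (out : List (List String)) (cur : List String) (seen : Bool),
      cells.foldl (altStep pid) (out, cur, seen) = (out, cur ++ cells, seen) := by
  induction cells with
  | nil => intro out cur seen; simp
  | cons c cells ih =>
    intro out cur seen
    have hc : PySem.Str.isIn pid c = false := h c (by simp)
    rw [List.foldl_cons]
    have hstep : altStep pid (out, cur, seen) c = (out, cur ++ [c], seen) := by
      simp [altStep, show PySem.Chars.isIn pid.toList c.toList = false by simpa using hc]
    rw [hstep, ih (fun x hx => h x (List.mem_cons_of_mem _ hx)) out (cur ++ [c]) seen]
    simp

lemma isIn_self (pid : String) : PySem.Str.isIn pid pid = true := by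
  rw [PySem.Str.isIn_iff_infix]

-- value of one altStep when the cell contains pid and the flag is not yet set
lemma altStep_first (pid c : String) (out : List (List String)) (cur : List String)
    (hc : PySem.Str.isIn pid c = true) :
    altStep pid (out, cur, false) c = (out, cur ++ [c], true) := by
  simp [altStep, show PySem.Chars.isIn pid.toList c.toList = true by simpa using hc]

-- value of one altStep when the cell contains pid and the flag is set
lemma altStep_split (pid c : String) (out : List (List String)) (cur : List String)
    (hc : PySem.Str.isIn pid c = true) :
    altStep pid (out, cur, true) c =
      (out ++ [cur ++ [PySem.Str.replace c pid ""]], [pid], true) := by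
  simp [altStep, show PySem.Chars.isIn pid.toList c.toList = true by simpa using hc]

-- B's run on a row decomposed at its first and second occurrence of pid
lemma alt_decomp (pid c0 c1 : String) (pre mid post : List String)
    (hpre : ∀ x ∈ pre, PySem.Str.isIn pid x = false)
    (hc0 : PySem.Str.isIn pid c0 = true)
    (hmid : ∀ x ∈ mid, PySem.Str.isIn pid x = false)
    (hc1 : PySem.Str.isIn pid c1 = true) :
    splitMultiLogsinOneRow_alt (pre ++ c0 :: (mid ++ c1 :: post)) pid =
      ((pre ++ c0 :: mid) ++ [PySem.Str.replace c1 pid ""]) ::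
        splitMultiLogsinOneRow_alt (pid :: post) pid := by
  unfold splitMultiLogsinOneRow_alt
  rw [List.foldl_append, foldl_altStep_none pid pre hpre, List.foldl_cons,
      altStep_first pid c0 _ _ hc0, List.foldl_append, foldl_altStep_none pid mid hmid,
      List.foldl_cons, altStep_split pid c1 _ _ hc1,
      foldl_altStep_out pid post, List.foldl_cons, altStep_first pid pid _ _ (isIn_self pid),
      foldl_altStep_out pid post]
  simp

-- the main equivalence, by strong induction on the row length
lemma main_aux (pid : String) : ∀ (n : Nat), ∀ (row : List String), row.length < n →
    splitMultiLogsinOneRow row pid = splitMultiLogsinOneRow_alt row pid := by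
  intro n
  induction n with
  | zero => intro row h; omega
  | succ n ih =>
    intro row hn
    rw [splitMultiLogsinOneRow]
    by_cases h1 : 1 < (idList row pid).length
    · rw [dif_pos h1]
      -- at least two occurrences: decompose the row at the first two
      obtain ⟨i, e, rest, hF⟩ : ∃ i e rest, idList row pid = i :: e :: rest := by
        rcases hFF : idList row pid with - | ⟨i, - | ⟨e, rest⟩⟩ <;>
          first
            | exact ⟨i, e, rest, rfl⟩
            | (rw [hFF] at h1; simp at h1)
      obtain ⟨pre, c0, suf, hxs1, hpre, hc0, hi, hl1⟩ :=
        idListFrom_eq_cons pid row 0 i (e :: rest) (by rw [← idList_eq]; exact hF)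
      obtain ⟨mid, c1, post, hsuf, hmid, hc1, he, hrest⟩ :=
        idListFrom_eq_cons pid suf (i + 1) e rest hl1.symm
      have hrow : row = pre ++ c0 :: (mid ++ c1 :: post) := by rw [hxs1, hsuf]
      have hi0 : i = (pre.length : Int) := by simpa using hi
      have heN : e = ((pre.length + 1 + mid.length : Nat) : Int) := by push_cast; omega
      have hgete : PySem.List.pyGetD (idList row pid) 1 0 = e := by
        rw [hF]; simp [PySem.List.pyGetD, PySem.List.pyGet?, PySem.List.pyIdx?]
      have hA1 : (pre ++ c0 :: mid).length = pre.length + 1 + mid.length := by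
        simp; omega
      have hsplit : pre ++ c0 :: (mid ++ c1 :: post) = (pre ++ c0 :: mid) ++ c1 :: post := by
        simp
      have hgetrow : PySem.List.pyGetD row e "" = c1 := by
        rw [hrow, hsplit, heN, ← hA1]
        simp only [PySem.List.pyGetD]
        rw [PySem.List.pyGet?_append_length]
        rfl
      have htake : PySem.List.slice row none (some e) = pre ++ c0 :: mid := by
        rw [hrow, hsplit, heN, PySem.List.slice_to_natCast]
        exact List.take_left' hA1
      have hdrop : PySem.List.slice row (some (e + 1)) none = post := by
        rw [hrow, heN, show (((pre.length + 1 + mid.length : Nat) : Int) + 1) =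
              ((pre.length + 1 + mid.length + 1 : Nat) : Int) by push_cast; ring,
            PySem.List.slice_from_natCast]
        rw [show pre ++ c0 :: (mid ++ c1 :: post) = ((pre ++ c0 :: mid) ++ [c1]) ++ post by simp]
        exact List.drop_left' (by simp; omega)
      simp only [hgete, hgetrow, htake, hdrop]
      -- B's value on this decomposition
      have hB := alt_decomp pid c0 c1 pre mid post hpre hc0 hmid hc1
      by_cases h2 : 2 < (idList row pid).length
      · rw [if_pos h2]
        have hlen2 : (pid :: post).length < n := by
          have : row.length = pre.length + 1 + (mid.length + 1 + post.length) := by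
            rw [hrow]; simp; omega
          simp only [List.length_cons]
          omega
        rw [PySem.List.pyGetD_neg_one_append_singleton, PySem.List.slice_to_neg_one,
            ih (pid :: post) hlen2, hrow, hB]
        simp
      · rw [if_neg h2]
        -- exactly two occurrences: rest = [] so post has none
        have hrest0 : rest = [] := by
          rw [hF] at h2; simp at h2; omega
        have hpost : ∀ x ∈ post, PySem.Str.isIn pid x = false :=
          (idListFrom_nil_iff pid post (e + 1)).1 (by rw [← hrest, hrest0])
        rw [hrow, hB]
        unfold splitMultiLogsinOneRow_alt
        rw [List.foldl_cons, altStep_first pid pid _ _ (isIn_self pid),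
            foldl_altStep_none pid post hpost]
        simp
    · rw [dif_neg h1]
      rcases hF : idList row pid with - | ⟨i, l⟩
      · -- no occurrence at all: B never splits
        have hall : ∀ x ∈ row, PySem.Str.isIn pid x = false :=
          (idListFrom_nil_iff pid row 0).1 (by rw [← idList_eq]; exact hF)
        rw [splitMultiLogsinOneRow_alt]
        rw [foldl_altStep_none pid row hall]
        simp
      · -- exactly one occurrence
        have hl : l = [] := by
          rw [hF] at h1; simp at h1; omega
        subst hl
        obtain ⟨pre, c0, suf, hxs1, hpre, hc0, hi, hl1⟩ :=
          idListFrom_eq_cons pid row 0 i [] (by rw [← idList_eq]; exact hF)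
        have hsufall : ∀ x ∈ suf, PySem.Str.isIn pid x = false :=
          (idListFrom_nil_iff pid suf (i + 1)).1 hl1.symm
        rw [hxs1, splitMultiLogsinOneRow_alt]
        rw [List.foldl_append, foldl_altStep_none pid pre hpre, List.foldl_cons,
            altStep_first pid c0 _ _ hc0, foldl_altStep_none pid suf hsufall]
        simp

-- ===== VERDICT (by name: the statement is the Claim_ definition above) =====
theorem splitMultiLogsinOneRow_spec : Claim_equal_splitMultiLogsinOneRow := by
  intro row pid _
  unfold Spec_splitMultiLogsinOneRow
  exact main_aux pid (row.length + 1) row (by omega)
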